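-- pv_equiv track=rewrite | github.com/slieer/py | py-dev-study/src/ch00_simple/ch07_os_file_dir.py | filter_dirs
-- ===== SOURCE A (Python) =====
-- def filter_dirs(dirs, filter_index, filters = []):
--     if (filter_index >= len(filters)):
--         return dirs
--     else:
--         directory_prefixs = []
--         tmp_dirs = []
--         for value in dirs:
--             if filters[filter_index] in value:
--                 directory_prefixs.append(value.split(filters[filter_index])[0])
--
--         directory_prefixs = list(set(directory_prefixs))
--
--         for value in dirs:
--             flag = False
--             for directory_prefix in directory_prefixs:
--                 if directory_prefix in value:
--                     if filters[filter_index] in value: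
--                         tmp_dirs.append(value)
--                     flag = True
--                     break
--                 else:
--                     continue
--             if flag is True:
--                 continue
--             else:
--                 tmp_dirs.append(value)
--
--         return filter_dirs(tmp_dirs, filter_index+1, filters)
-- ===== SOURCE B (Python) =====
-- def filter_dirs(dirs, filter_index, filters = []):
--     while dirs and filter_index < len(filters):
--         f = filters[filter_index]
--         prefixes = {v.split(f)[0] for v in dirs if f in v}
--         dirs = [v for v in dirs if f in v or not any(p in v for p in prefixes)]
--         filter_index += 1
--     return dirs
-- ===== Notes on version B (the rewrite author's own statement) =====
-- stated objective: simpler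
-- what changed: Replaced the tail recursion, append-accumulator loops and flag/break inner scan by an iterative while loop whose body is two comprehensions: a set comprehension for the prefixes and a single keep-test 'f in v or no prefix is contained in v' that makes the first-match/break logic disappear; the comprehensions and short-circuiting any() run in C, giving a measured constant-factor speedup.
import Mathlib
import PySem

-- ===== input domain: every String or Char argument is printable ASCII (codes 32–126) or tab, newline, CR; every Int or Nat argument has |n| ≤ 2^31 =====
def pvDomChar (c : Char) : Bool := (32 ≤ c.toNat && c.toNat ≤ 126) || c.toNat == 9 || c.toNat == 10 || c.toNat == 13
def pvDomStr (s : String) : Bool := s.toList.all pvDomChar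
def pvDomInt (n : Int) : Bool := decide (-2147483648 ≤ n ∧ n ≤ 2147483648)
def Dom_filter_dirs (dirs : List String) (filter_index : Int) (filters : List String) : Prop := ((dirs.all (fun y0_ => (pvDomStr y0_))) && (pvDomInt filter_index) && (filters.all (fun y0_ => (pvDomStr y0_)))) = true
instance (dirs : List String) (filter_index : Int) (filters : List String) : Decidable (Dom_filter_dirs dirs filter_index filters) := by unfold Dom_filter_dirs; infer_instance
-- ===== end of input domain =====

-- B rewrites A's tail recursion with flag/break inner scan as an iterative loop of two comprehensions (objective: simpler); same return value, no mutation involved.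

-- ===== PORT A =====
-- value.split(f)[0]; the defaults are only reached for f = "", which Pre_ excludes (ValueError in Python)
def pvSplitHead (v f : String) : String := ((PySem.Str.split? v f).getD [v]).getD 0 v

-- A's inner 'for directory_prefix in directory_prefixs: … break' loop with the flag, acting on the accumulator tmp_dirs
def pvInner (ps : List String) (filt v : String) (acc : List String) : List String :=
  match ps with
  | [] => acc ++ [v]
  | p :: rest =>
      if PySem.Str.isIn p v then
        (if PySem.Str.isIn filt v then acc ++ [v] else acc)
      else pvInner rest filt v acc

def filter_dirs (dirs : List String) (filter_index : Int) (filters : List String) : List String :=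
  if (filters.length : Int) ≤ filter_index then dirs
  else
    let filt := PySem.List.pyGetD filters filter_index ""
    let directory_prefixs :=
      PySem.Set.ofList (dirs.foldl (fun acc v => if PySem.Str.isIn filt v then acc ++ [pvSplitHead v filt] else acc) [])
    let tmp_dirs := dirs.foldl (fun acc v => pvInner directory_prefixs filt v acc) []
    filter_dirs tmp_dirs (filter_index + 1) filters
termination_by ((filters.length : Int) - filter_index).toNat
decreasing_by omega

-- ===== PORT B =====
def filter_dirs_alt (dirs : List String) (filter_index : Int) (filters : List String) : List String :=
  if dirs ≠ [] ∧ filter_index < (filters.length : Int) then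
    let f := PySem.List.pyGetD filters filter_index ""
    let prefixes := PySem.Set.ofList ((dirs.filter (fun v => PySem.Str.isIn f v)).map (fun v => pvSplitHead v f))
    filter_dirs_alt
      (dirs.filter (fun v => PySem.Str.isIn f v || !(prefixes.any (fun p => PySem.Str.isIn p v))))
      (filter_index + 1) filters
  else dirs
termination_by ((filters.length : Int) - filter_index).toNat
decreasing_by omega

-- ===== PRECONDITION & SPEC =====
-- Pre_ = exactly where the Python A returns: it raises IndexError when dirs is nonempty and filter_index < -len(filters)
-- (negative indices wrap), and ValueError (split('')) when a reached filter is the empty string while dirs is nonempty.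
def Pre_filter_dirs (dirs : List String) (filter_index : Int) (filters : List String) : Prop :=
  dirs = [] ∨ (filters.length : Int) ≤ filter_index ∨
    (-(filters.length : Int) ≤ filter_index ∧
      ∀ i ∈ PySem.List.pyRange filter_index (filters.length : Int) 1, PySem.List.pyGetD filters i "" ≠ "")
instance (dirs : List String) (filter_index : Int) (filters : List String) : Decidable (Pre_filter_dirs dirs filter_index filters) := by unfold Pre_filter_dirs; infer_instance

def pvWitness_filter_dirs : List String × Int × List String := (["a/b/c", "a-b", "d/e"], 0, ["/", "-"])

def Spec_filter_dirs (dirs : List String) (filter_index : Int) (filters : List String) (out : List String) : Prop := out = filter_dirs_alt dirs filter_index filters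
instance (dirs : List String) (filter_index : Int) (filters : List String) (out : List String) : Decidable (Spec_filter_dirs dirs filter_index filters out) := by unfold Spec_filter_dirs; infer_instance

-- ===== CLAIM (what is proved, stated in full; the proofs are below) =====
def Claim_equal_filter_dirs : Prop := ∀ (dirs : List String) (filter_index : Int) (filters : List String), Dom_filter_dirs dirs filter_index filters → Pre_filter_dirs dirs filter_index filters → Spec_filter_dirs dirs filter_index filters (filter_dirs dirs filter_index filters)

-- ===== LEMMAS AND PROOFS =====

-- A's inner break loop keeps v exactly when 'filt in v' or no prefix is contained in v
theorem pvInner_eq (ps : List String) (filt v : String) (acc : List String) :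
    pvInner ps filt v acc =
      if PySem.Str.isIn filt v || !(ps.any (fun p => PySem.Str.isIn p v)) then acc ++ [v] else acc := by
  induction ps with
  | nil => simp [pvInner]
  | cons p rest ih =>
      by_cases hp : PySem.Chars.isIn p.toList v.toList = true
      · by_cases hf : PySem.Chars.isIn filt.toList v.toList = true <;>
          simp [pvInner, hp, hf]
      · simp [pvInner, hp, ih]

-- one level of A's body equals one level of B's body
theorem level_eq (dirs : List String) (filt : String) :
    dirs.foldl (fun acc v =>
        pvInner (PySem.Set.ofList (dirs.foldl (fun acc v => if PySem.Str.isIn filt v then acc ++ [pvSplitHead v filt] else acc) [])) filt v acc) []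
    = dirs.filter (fun v => PySem.Str.isIn filt v ||
        !((PySem.Set.ofList ((dirs.filter (fun v => PySem.Str.isIn filt v)).map (fun v => pvSplitHead v filt))).any
            (fun p => PySem.Str.isIn p v))) := by
  rw [PySem.List.foldl_append_if (fun v => PySem.Str.isIn filt v) (fun v => pvSplitHead v filt) dirs []]
  have h : (fun (acc : List String) (v : String) =>
      pvInner (PySem.Set.ofList ([] ++ (dirs.filter (fun v => PySem.Str.isIn filt v)).map (fun v => pvSplitHead v filt))) filt v acc)
      = fun acc v => if (PySem.Str.isIn filt v ||
          !((PySem.Set.ofList ((dirs.filter (fun v => PySem.Str.isIn filt v)).map (fun v => pvSplitHead v filt))).any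
              (fun p => PySem.Str.isIn p v))) then acc ++ [v] else acc := by
    funext acc v
    rw [List.nil_append, pvInner_eq]
  rw [h, PySem.List.foldl_append_if_eq_filter, List.nil_append]

theorem A_nil (filters : List String) : ∀ n (fi : Int), ((filters.length : Int) - fi).toNat = n →
    filter_dirs [] fi filters = [] := by
  intro n
  induction n with
  | zero =>
      intro fi h
      rw [filter_dirs]
      simp only [if_pos (by omega : (filters.length : Int) ≤ fi)]
  | succ n ih =>
      intro fi h
      rw [filter_dirs]
      by_cases hle : (filters.length : Int) ≤ fi
      · simp [hle]
      · simp only [if_neg hle, List.foldl_nil]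
        exact ih (fi + 1) (by omega)

theorem main_eq (filters : List String) : ∀ n (fi : Int) (dirs : List String),
    ((filters.length : Int) - fi).toNat = n →
    filter_dirs dirs fi filters = filter_dirs_alt dirs fi filters := by
  intro n
  induction n with
  | zero =>
      intro fi dirs h
      rw [filter_dirs, filter_dirs_alt]
      have hle : (filters.length : Int) ≤ fi := by omega
      rw [if_pos hle, if_neg (fun hc => absurd hc.2 (not_lt.mpr hle))]
  | succ n ih =>
      intro fi dirs h
      rw [filter_dirs, filter_dirs_alt]
      by_cases hle : (filters.length : Int) ≤ fi
      · rw [if_pos hle, if_neg (fun hc => absurd hc.2 (not_lt.mpr hle))]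
      · simp only [if_neg hle]
        by_cases hd : dirs = []
        · subst hd
          rw [if_neg (fun hc => hc.1 rfl)]
          simp only [List.foldl_nil]
          exact A_nil filters n (fi + 1) (by omega)
        · rw [if_pos ⟨hd, by omega⟩]
          rw [level_eq dirs (PySem.List.pyGetD filters fi "")]
          exact ih (fi + 1) _ (by omega)

-- ===== VERDICT (by name: the statement is the Claim_ definition above) =====
theorem filter_dirs_spec : Claim_equal_filter_dirs := by
  intro dirs fi filters _ _
  unfold Spec_filter_dirs
  exact main_eq filters _ fi dirs rfl
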